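-- pv_equiv track=rewrite | github.com/LazyDeveloperTroh/algorithm | 프로그래머스/두개 뽑아서 더하기.py | solution
-- ===== SOURCE A (Python) =====
-- def comb(arr, n):
--     result = []
--     if n == 0:
--         return [[]]
--
--     if n == 1:
--         return [[i] for i in arr]
--
--     if n >= 2:
--         for i in range(len(arr)):
--             el = arr[i]
--             p = comb(arr[i+1:], n-1)
--             for rest in p:
--                 result.append([el]+rest)
--     return result
--
-- def solution(numbers):
--     result = comb(numbers, 2)
--     addSet = set()
--     for v1,v2 in result:
--         addSet.add(v1+v2)
--
--     answer = list(addSet)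
--     answer.sort()
--     return answer
-- ===== SOURCE B (Python) =====
-- def solution(numbers):
--     addSet = set()
--     n = len(numbers)
--     for i in range(n):
--         for j in range(i + 1, n):
--             addSet.add(numbers[i] + numbers[j])
--     return sorted(addSet)
-- ===== Notes on version B (the rewrite author's own statement) =====
-- stated objective: simpler
-- what changed: Drops the recursive comb helper that materializes all 2-element sublists via suffix slices and a second summation pass; instead two nested index loops add each pairwise sum directly into the set, then sorted(addSet).
import Mathlib
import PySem

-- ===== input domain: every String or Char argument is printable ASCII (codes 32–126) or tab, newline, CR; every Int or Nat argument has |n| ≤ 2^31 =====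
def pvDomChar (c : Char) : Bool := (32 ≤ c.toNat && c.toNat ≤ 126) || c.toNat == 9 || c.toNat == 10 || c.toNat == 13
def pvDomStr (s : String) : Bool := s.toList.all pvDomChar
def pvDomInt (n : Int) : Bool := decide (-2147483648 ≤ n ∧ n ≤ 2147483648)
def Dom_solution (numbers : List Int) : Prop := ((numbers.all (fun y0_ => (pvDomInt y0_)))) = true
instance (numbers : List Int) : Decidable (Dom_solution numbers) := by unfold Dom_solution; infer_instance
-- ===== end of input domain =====

-- B replaces A's recursive comb (building all 2-element sublists via suffix slices, then a
-- separate summation pass) with two nested index loops adding each pairwise sum directly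
-- into the set; objective: simpler.


-- ===== PORT A =====
def comb (arr : List Int) (n : Int) : List (List Int) :=
  if n = 0 then [[]]
  else if n = 1 then arr.map (fun i => [i])
  else if 2 ≤ n then
    (PySem.List.pyRange 0 arr.length 1).foldl (fun result i =>
      result ++ (comb (PySem.List.slice arr (some (i + 1)) none) (n - 1)).map
        (fun rest => PySem.List.pyGetD arr i 0 :: rest)) []
  else []
termination_by n.toNat
decreasing_by omega

def solution (numbers : List Int) : List Int :=
  let result := comb numbers 2
  let addSet := result.foldl (fun s p =>
    match p with
    | [v1, v2] => PySem.Set.add s (v1 + v2)   -- the 'for v1,v2 in result' unpack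
    | _ => s)                                  -- unreachable: comb _ 2 yields pairs only
    PySem.Set.empty
  PySem.List.sorted addSet (fun x => x) false

-- ===== PORT B =====
def solution_alt (numbers : List Int) : List Int :=
  let n : Int := numbers.length
  let addSet := (PySem.List.pyRange 0 n 1).foldl (fun s i =>
    (PySem.List.pyRange (i + 1) n 1).foldl (fun s j =>
      PySem.Set.add s (PySem.List.pyGetD numbers i 0 + PySem.List.pyGetD numbers j 0)) s)
    PySem.Set.empty
  PySem.List.sorted addSet (fun x => x) false

-- ===== PRECONDITION & SPEC =====
def Spec_solution (numbers : List Int) (out : List Int) : Prop := out = solution_alt numbers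
instance (numbers : List Int) (out : List Int) : Decidable (Spec_solution numbers out) := by unfold Spec_solution; infer_instance

-- ===== CLAIM (what is proved, stated in full; the proofs are below) =====
def Claim_equal_solution : Prop := ∀ (numbers : List Int), Dom_solution numbers → Spec_solution numbers (solution numbers)

-- ===== LEMMAS AND PROOFS =====

lemma comb_one (arr : List Int) : comb arr 1 = arr.map (fun i => [i]) := by
  rw [comb]; norm_num

lemma comb_two (arr : List Int) : comb arr 2 =
    (PySem.List.pyRange 0 arr.length 1).foldl (fun result i =>
      result ++ (PySem.List.slice arr (some (i + 1)) none).map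
        (fun y => [PySem.List.pyGetD arr i 0, y])) [] := by
  rw [comb]; norm_num [comb_one, List.map_map]
  congr 1

lemma foldl_concat_foldl {α β γ : Type} (g : α → List β) (f : γ → β → γ) :
    ∀ (is : List α) (acc : List β) (init : γ),
      (is.foldl (fun r i => r ++ g i) acc).foldl f init
        = is.foldl (fun s i => (g i).foldl f s) (acc.foldl f init) := by
  intro is
  induction is with
  | nil => intro acc init; rfl
  | cons i is ih =>
      intro acc init
      simp only [List.foldl_cons, ih, List.foldl_append]

-- ===== VERDICT (by name: the statement is the Claim_ definition above) =====
theorem solution_spec : Claim_equal_solution := by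
  intro numbers _
  unfold Spec_solution
  simp only [solution, solution_alt, comb_two, foldl_concat_foldl, List.foldl_nil]
  congr 1
  apply PySem.List.foldl_congr_mem
  intro s i hi
  have h0 : 0 ≤ i := ((PySem.List.mem_pyRange_one).1 hi).1
  have hi1 : i + 1 = ((i + 1).toNat : Int) := by omega
  rw [hi1, PySem.List.slice_from_natCast, List.foldl_map,
      PySem.List.foldl_pyRange_pyGetD' numbers 0
        (fun s y => PySem.Set.add s (PySem.List.pyGetD numbers i 0 + y)) s (by omega)]
  simp
  rw [show (max (i + 1) 0).toNat = (i + 1).toNat by omega]
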